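-- pv_equiv track=rewrite | github.com/pdmstj/Coding-Test | 프로그래머스/1/92334. 신고 결과 받기/신고 결과 받기.py | solution
-- ===== SOURCE A (Python) =====
-- def solution(id_list, report, k):
--     report = set(report)
--
--     reported_count = {user: 0 for user in id_list}
--     user_reports = {user: [] for user in id_list}
--
--     for rep in report:
--         reporter, reported = rep.split()
--         reported_count[reported] += 1
--         user_reports[reporter].append(reported)
--
--     banned_users = {user for user, count in reported_count.items() if count >= k}
--
--     result = []
--     for user in id_list:
--         mail_count = sum(1 for reported in user_reports[user] if reported in banned_users)
--         result.append(mail_count)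
--
--     return result
-- ===== SOURCE B (Python) =====
-- def solution(id_list, report, k):
--     pairs = [tuple(r.split()) for r in set(report)]
--     cnt = {}
--     for _, b in pairs:
--         cnt[b] = cnt.get(b, 0) + 1
--     return [sum(1 for a, b in pairs if a == u and cnt[b] >= k) for u in id_list]
-- ===== Notes on version B (the rewrite author's own statement) =====
-- stated objective: simpler
-- what changed: Replaces A's two pre-initialized per-user dicts (reported counts and per-reporter report lists) and banned-set pass with a single counter over the parsed deduped reports plus one direct counting comprehension per user.
import Mathlib
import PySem

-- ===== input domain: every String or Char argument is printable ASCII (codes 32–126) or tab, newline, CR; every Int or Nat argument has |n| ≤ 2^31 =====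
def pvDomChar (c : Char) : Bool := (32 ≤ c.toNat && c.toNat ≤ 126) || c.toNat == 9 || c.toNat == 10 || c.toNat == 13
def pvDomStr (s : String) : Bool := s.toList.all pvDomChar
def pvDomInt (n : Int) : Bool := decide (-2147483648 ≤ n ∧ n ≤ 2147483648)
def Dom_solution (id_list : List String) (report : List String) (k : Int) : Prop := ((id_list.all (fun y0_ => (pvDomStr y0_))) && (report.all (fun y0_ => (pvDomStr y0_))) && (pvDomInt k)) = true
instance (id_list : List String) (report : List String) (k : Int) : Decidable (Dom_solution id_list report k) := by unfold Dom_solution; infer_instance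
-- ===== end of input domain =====

-- B replaces A's two pre-initialized per-user dicts and banned-set pass with one counter over
-- the parsed deduped reports plus a direct counting comprehension per user (simpler decomposition).

-- ===== PORT A =====
-- loop body of A's `for rep in report:` (tuple unpacking raises where split ≠ 2 tokens;
-- those inputs and unknown users, where Python raises KeyError, are excluded by Pre_)
def pvStepA (st : PySem.Dict String Int × PySem.Dict String (List String)) (rep : String) :
    PySem.Dict String Int × PySem.Dict String (List String) :=
  match PySem.Str.split₀ rep with
  | [reporter, reported] =>
      (st.1.modify reported 0 (· + 1), st.2.modify reporter [] (· ++ [reported]))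
  | _ => st

def solution (id_list : List String) (report : List String) (k : Int) : List Int :=
  let reportS := PySem.Set.ofList report
  let reported_count : PySem.Dict String Int :=
    id_list.foldl (fun d u => d.insert u 0) PySem.Dict.empty
  let user_reports : PySem.Dict String (List String) :=
    id_list.foldl (fun d u => d.insert u []) PySem.Dict.empty
  let st := reportS.foldl pvStepA (reported_count, user_reports)
  let banned_users : PySem.Set String :=
    PySem.Set.ofList ((st.1.items.filter (fun p => decide (k ≤ p.2))).map (·.1))
  id_list.map (fun u =>
    (((st.2.getD u []).filter (fun reported => banned_users.contains reported)).length : Int))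

-- ===== PORT B =====
def pvParse (r : String) : String × String :=
  match PySem.Str.split₀ r with
  | [a, b] => (a, b)
  | _ => ("", "")   -- Python tuple-unpacking raises here (excluded by Pre_)

def solution_alt (id_list : List String) (report : List String) (k : Int) : List Int :=
  let pairs := (PySem.Set.ofList report).map pvParse
  let cnt : PySem.Dict String Int :=
    pairs.foldl (fun d p => d.insert p.2 (d.getD p.2 0 + 1)) PySem.Dict.empty
  id_list.map (fun u =>
    ((pairs.filter (fun p => p.1 == u && decide (k ≤ cnt.getD p.2 0))).length : Int))

-- ===== PRECONDITION & SPEC =====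
-- Pre_ excludes exactly the inputs where A raises: a report entry that does not split into
-- two whitespace-separated tokens (ValueError on unpacking) or one mentioning a user absent
-- from id_list (KeyError).
def Pre_solution (id_list : List String) (report : List String) (k : Int) : Prop :=
  ∀ r ∈ report, (PySem.Str.split₀ r).length = 2 ∧ ∀ t ∈ PySem.Str.split₀ r, t ∈ id_list
instance (id_list : List String) (report : List String) (k : Int) : Decidable (Pre_solution id_list report k) := by unfold Pre_solution; infer_instance

def pvWitness_solution : List String × List String × Int :=
  (["muzi", "frodo", "apeach", "neo"],
   ["muzi frodo", "apeach frodo", "frodo neo", "muzi neo", "apeach muzi"], 2)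

def Spec_solution (id_list : List String) (report : List String) (k : Int) (out : List Int) : Prop := out = solution_alt id_list report k
instance (id_list : List String) (report : List String) (k : Int) (out : List Int) : Decidable (Spec_solution id_list report k out) := by unfold Spec_solution; infer_instance

-- ===== CLAIM (what is proved, stated in full; the proofs are below) =====
def Claim_equal_solution : Prop := ∀ (id_list : List String) (report : List String) (k : Int), Dom_solution id_list report k → Pre_solution id_list report k → Spec_solution id_list report k (solution id_list report k)

-- ===== LEMMAS AND PROOFS =====

-- a report that splits into two tokens is parsed by pvParse into exactly those tokens
theorem pvParse_eq (r : String) (h : (PySem.Str.split₀ r).length = 2) :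
    PySem.Str.split₀ r = [(pvParse r).1, (pvParse r).2] := by
  rcases hl : PySem.Str.split₀ r with _ | ⟨a, _ | ⟨b, _ | _⟩⟩ <;> simp_all [pvParse]

-- the constant-initialisation fold keeps every lookup at the default
theorem getD_foldl_insert_const {ν : Type} (l : List String) (d : PySem.Dict String ν)
    (c : ν) (b : String) (h : d.getD b c = c) :
    (l.foldl (fun d u => d.insert u c) d).getD b c = c := by
  induction l generalizing d with
  | nil => exact h
  | cons x xs ih =>
      simp only [List.foldl_cons]
      exact ih _ (by rw [PySem.Dict.getD_insert]; split <;> simp [h])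

-- an element of the update list is in the updated set
theorem mem_set_update_of_mem_list {α : Type} [BEq α] [LawfulBEq α] (s : PySem.Set α)
    (l : List α) (x : α) (h : x ∈ s ∨ x ∈ l) : x ∈ PySem.Set.update s l := by
  induction l generalizing s with
  | nil => simpa [PySem.Set.update] using h.resolve_right (by simp)
  | cons y ys ih =>
      simp only [PySem.Set.update, List.foldl_cons] at *
      refine ih _ ?_
      rcases h with h | h
      · exact Or.inl ((PySem.Set.mem_add s y x).mpr (Or.inl h))
      · rcases List.mem_cons.mp h with rfl | h
        · exact Or.inl ((PySem.Set.mem_add s x x).mpr (Or.inr rfl))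
        · exact Or.inr h

-- counter fold over pair lists, keyed by the second component (A's modify form, B's insert form)
theorem count_snd_modify (l : List (String × String)) (d : PySem.Dict String Int) (b : String) :
    (l.foldl (fun d p => d.modify p.2 0 (· + 1)) d).getD b 0 = d.getD b 0 + ((l.map (·.2)).count b : Int) := by
  rw [← List.foldl_map (f := fun p : String × String => p.2) (g := fun d x => PySem.Dict.modify d x 0 (· + 1))]
  exact PySem.Dict.getD_foldl_modify_add_one _ d b

theorem count_snd_insert (l : List (String × String)) (d : PySem.Dict String Int) (b : String) :
    (l.foldl (fun d p => d.insert p.2 (d.getD p.2 0 + 1)) d).getD b 0 = d.getD b 0 + ((l.map (·.2)).count b : Int) := by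
  rw [← List.foldl_map (f := fun p : String × String => p.2) (g := fun d x => PySem.Dict.insert d x (PySem.Dict.getD d x 0 + 1))]
  exact PySem.Dict.getD_foldl_insert_add_one _ d b

theorem solution_spec : Claim_equal_solution := by
  intro id_list report k _ hP
  simp only [Spec_solution, solution, solution_alt]
  set L := PySem.Set.ofList report with hL
  have hmem : ∀ r ∈ L, PySem.Str.split₀ r = [(pvParse r).1, (pvParse r).2] ∧
      (pvParse r).1 ∈ id_list ∧ (pvParse r).2 ∈ id_list := by
    intro r hr
    have hr' : r ∈ report := (PySem.Set.mem_ofList report r).mp hr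
    obtain ⟨hlen, hall⟩ := hP r hr'
    have he := pvParse_eq r hlen
    exact ⟨he, hall _ (by rw [he]; simp), hall _ (by rw [he]; simp)⟩
  set pairs := L.map pvParse with hpairs
  have hpmem : ∀ p ∈ pairs, p.1 ∈ id_list ∧ p.2 ∈ id_list := by
    intro p hp
    obtain ⟨r, hr, rfl⟩ := List.mem_map.mp hp
    exact (hmem r hr).2
  set rc0 : PySem.Dict String Int := id_list.foldl (fun d u => d.insert u 0) PySem.Dict.empty with hrc0
  set ur0 : PySem.Dict String (List String) := id_list.foldl (fun d u => d.insert u []) PySem.Dict.empty with hur0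
  -- A's single fold splits into two independent folds over `pairs`
  have hfold : L.foldl pvStepA (rc0, ur0)
      = (pairs.foldl (fun d p => d.modify p.2 0 (· + 1)) rc0,
         pairs.foldl (fun d p => d.modify p.1 [] (· ++ [p.2])) ur0) := by
    rw [PySem.List.foldl_congr_mem L _
      (fun st rep => ((st.1.modify (pvParse rep).2 0 (· + 1)),
                      (st.2.modify (pvParse rep).1 [] (· ++ [(pvParse rep).2])))) _
      (by intro acc x hx; simp only [pvStepA, (hmem x hx).1])]
    rw [hpairs, List.foldl_map, List.foldl_map]
    exact PySem.List.foldl_prod_mk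
      (fun (d : PySem.Dict String Int) rep => d.modify (pvParse rep).2 0 (· + 1))
      (fun (d : PySem.Dict String (List String)) rep => d.modify (pvParse rep).1 [] (· ++ [(pvParse rep).2]))
      L rc0 ur0
  rw [hfold]
  set rcF := pairs.foldl (fun d p => d.modify p.2 0 (· + 1)) rc0 with hrcF
  -- A's reported_count is a counter over the reported names
  have h_rc : ∀ b, rcF.getD b 0 = ((pairs.map (·.2)).count b : Int) := by
    intro b
    rw [hrcF, count_snd_modify,
      getD_foldl_insert_const id_list PySem.Dict.empty 0 b (by simp [pysem])]
    simp
  -- B's counter is the same counter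
  have h_cnt : ∀ b, (pairs.foldl (fun d p => d.insert p.2 (d.getD p.2 0 + 1)) PySem.Dict.empty).getD b 0
      = ((pairs.map (·.2)).count b : Int) := by
    intro b
    rw [count_snd_insert]
    simp [pysem]
  -- A's user_reports lists the reported names per reporter
  have h_ur : ∀ u, (pairs.foldl (fun d p => d.modify p.1 [] (· ++ [p.2])) ur0).getD u []
      = (pairs.filter (fun p => p.1 == u)).map (·.2) := by
    intro u
    rw [PySem.Dict.getD_foldl_modify_append,
      getD_foldl_insert_const id_list PySem.Dict.empty [] u (by simp [pysem])]
    simp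
  -- banned-set membership is a count threshold
  have hnodup : rcF.keys.Nodup :=
    PySem.Dict.nodup_keys_foldl_modify_key pairs (·.2) 0 (fun _ _ v => v + 1) rc0
      (PySem.Dict.nodup_keys_foldl_insert id_list (fun _ _ => 0) PySem.Dict.empty (by simp [pysem]))
  have hkeys : ∀ b ∈ id_list, b ∈ rcF.keys := by
    intro b hb
    rw [hrcF, PySem.Dict.keys_foldl_modify_key]
    refine mem_set_update_of_mem_list _ _ _ (Or.inl ?_)
    rw [hrc0, PySem.Dict.keys_foldl_insert]
    exact mem_set_update_of_mem_list _ _ _ (Or.inr hb)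
  have h_banned : ∀ b ∈ id_list,
      (PySem.Set.ofList ((rcF.items.filter (fun p => decide (k ≤ p.2))).map (·.1))).contains b
      = decide (k ≤ rcF.getD b 0) := by
    intro b hb
    have hc : ∀ (s : PySem.Set String), s.contains b = decide (b ∈ s) := by
      intro s; simp [PySem.Set.contains]
    rw [hc, decide_eq_decide]
    rw [PySem.Set.mem_ofList]
    constructor
    · intro h
      obtain ⟨p, hpf, rfl⟩ := List.mem_map.mp h
      obtain ⟨hpi, hq⟩ := List.mem_filter.mp hpf
      have : rcF.get? p.1 = some p.2 := (PySem.Dict.get?_eq_some_iff_mem_items rcF p.1 p.2 hnodup).mpr hpi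
      rw [PySem.Dict.getD_eq_get?_getD, this]
      simpa using hq
    · intro h
      have hbk := hkeys b hb
      have hsome : rcF.get? b ≠ none :=
        fun h => ((PySem.Dict.get?_eq_none_iff_not_mem_keys rcF b).mp h) hbk
      obtain ⟨v, hv⟩ := Option.ne_none_iff_exists'.mp hsome
      have hgd : rcF.getD b 0 = v := by rw [PySem.Dict.getD_eq_get?_getD, hv]; rfl
      refine List.mem_map.mpr ⟨(b, v), List.mem_filter.mpr ⟨?_, ?_⟩, rfl⟩
      · exact (PySem.Dict.get?_eq_some_iff_mem_items rcF b v hnodup).mp hv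
      · simpa using hgd ▸ h
  -- finish: pointwise equality of the two result lists
  refine List.map_congr_left ?_
  intro u hu
  rw [h_ur u, List.filter_map]
  congr 1
  rw [List.length_map, List.filter_filter]
  refine congrArg List.length (List.filter_congr ?_)
  intro p hp
  have h2 := (hpmem p hp).2
  simp only [Function.comp]
  rw [h_banned p.2 h2, h_rc p.2, h_cnt p.2]
  exact Bool.and_comm _ _
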